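-- pv_equiv track=rewrite | github.com/sumitDev11/Deep-Packet-Analyzer | dpi_engine_py/app_types.py | parse_ipv4_to_le_int
-- ===== SOURCE A (Python) =====
-- def parse_ipv4_to_le_int(ip: str) -> int:
--     parts = ip.split(".")
--     if len(parts) != 4:
--         return 0
--     out = 0
--     for i, p in enumerate(parts):
--         try:
--             out |= (int(p) & 0xFF) << (8 * i)
--         except ValueError:
--             return 0
--     return out
-- ===== SOURCE B (Python) =====
-- def parse_ipv4_to_le_int(ip: str) -> int:
--     parts = ip.split(".")
--     if len(parts) != 4:
--         return 0
--
--     def horner(ps):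
--         if not ps:
--             return 0
--         return (int(ps[0]) & 0xFF) + 256 * horner(ps[1:])
--
--     try:
--         return horner(parts)
--     except ValueError:
--         return 0
-- ===== Notes on version B (the rewrite author's own statement) =====
-- stated objective: alternative
-- what changed: B replaces A's indexed shift/OR accumulation loop with a recursive right-to-left Horner evaluation ((int(p)&0xFF) + 256*rest): no loop, no enumerate, no bitwise shifts/ORs, exceptions propagate out of the recursion instead of an early return inside the loop.
import Mathlib
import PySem

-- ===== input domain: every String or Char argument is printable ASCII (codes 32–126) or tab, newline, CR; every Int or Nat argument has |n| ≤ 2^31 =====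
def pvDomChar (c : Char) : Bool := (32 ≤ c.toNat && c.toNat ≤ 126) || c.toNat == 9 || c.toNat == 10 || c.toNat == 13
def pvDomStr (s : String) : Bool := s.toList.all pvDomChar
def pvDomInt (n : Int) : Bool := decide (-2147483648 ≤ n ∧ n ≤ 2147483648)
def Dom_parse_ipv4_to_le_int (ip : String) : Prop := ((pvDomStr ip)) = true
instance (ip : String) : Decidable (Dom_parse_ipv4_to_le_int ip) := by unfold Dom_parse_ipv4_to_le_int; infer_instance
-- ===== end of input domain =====

-- B computes the value by recursive Horner evaluation (+, *256) instead of A's indexed shift/OR loop; equal on all inputs.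


-- ===== PORT A =====
-- the for-loop over enumerate(parts): out |= (int(p) & 0xFF) << (8*i), early return 0 on ValueError
def pvLoopA : List (List Char) → Nat → Int → Int
  | [], _, out => out
  | p :: rest, i, out =>
    match PySem.Int.ofChars? p with
    | none => 0
    | some n => pvLoopA rest (i + 1) (PySem.Int.bor out ((PySem.Int.band n 255) <<< (8 * i)))

def parse_ipv4_to_le_int (ip : String) : Int :=
  let parts := PySem.Chars.splitOn ip.toList ['.']
  if parts.length ≠ 4 then 0 else pvLoopA parts 0 0

-- ===== PORT B =====
-- recursive horner(ps) = (int(ps[0]) & 0xFF) + 256 * horner(ps[1:]); a ValueError propagates (none)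
def pvHorner : List (List Char) → Option Int
  | [] => some 0
  | p :: rest =>
    match PySem.Int.ofChars? p with
    | none => none
    | some n => (pvHorner rest).map (fun r => PySem.Int.band n 255 + 256 * r)

def parse_ipv4_to_le_int_alt (ip : String) : Int :=
  let parts := PySem.Chars.splitOn ip.toList ['.']
  if parts.length ≠ 4 then 0 else
    match pvHorner parts with          -- try: return horner(parts) except ValueError: return 0
    | none => 0
    | some v => v

-- ===== PRECONDITION & SPEC =====
def Spec_parse_ipv4_to_le_int (ip : String) (out : Int) : Prop := out = parse_ipv4_to_le_int_alt ip
instance (ip : String) (out : Int) : Decidable (Spec_parse_ipv4_to_le_int ip out) := by unfold Spec_parse_ipv4_to_le_int; infer_instance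

-- ===== CLAIM (what is proved, stated in full; the proofs are below) =====
def Claim_equal_parse_ipv4_to_le_int : Prop := ∀ (ip : String), Dom_parse_ipv4_to_le_int ip → Spec_parse_ipv4_to_le_int ip (parse_ipv4_to_le_int ip)

-- ===== LEMMAS AND PROOFS =====

set_option maxRecDepth 4096 in
theorem pv_band255_bounds (n : Int) : 0 ≤ PySem.Int.band n 255 ∧ PySem.Int.band n 255 < 256 := by
  unfold PySem.Int.band
  have e255 : (255 : Int).toNat = 255 := rfl
  have h1 := Nat.and_le_right (n := n.toNat) (m := (255 : Int).toNat)
  have h2 := Nat.sub_le ((255 : Int).toNat) ((255 : Int).toNat &&& (-n - 1).toNat)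
  split_ifs <;> constructor <;> first | exact Int.natCast_nonneg _ | omega

theorem pv_bor_shift (x y : Int) (k : Nat) (hx : 0 ≤ x) (hxk : x < 2 ^ k) (hy : 0 ≤ y) :
    PySem.Int.bor x (y <<< k) = x + y * 2 ^ k := by
  have hs : y <<< k = y * 2 ^ k := by rw [Int.shiftLeft_eq]
  have hy2 : 0 ≤ y * 2 ^ k := by positivity
  have hcast : y * 2 ^ k = ((y.toNat * 2 ^ k : Nat) : Int) := by
    push_cast; rw [Int.toNat_of_nonneg hy]
  have hxk' : x.toNat < 2 ^ k := by
    have : ((2 ^ k : Nat) : Int) = 2 ^ k := by push_cast; ring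
    omega
  have key := Nat.two_pow_add_eq_or_of_lt (i := k) (b := x.toNat) hxk' y.toNat
  rw [hs, PySem.Int.bor_of_nonneg hx hy2, hcast, Int.toNat_natCast,
      Nat.lor_comm, Nat.mul_comm y.toNat, ← key]
  push_cast
  rw [Int.toNat_of_nonneg hx, Int.toNat_of_nonneg hy]
  ring

theorem pv_core (a b c d : List Char) :
    pvLoopA [a, b, c, d] 0 0 =
      match pvHorner [a, b, c, d] with
      | none => 0
      | some v => v := by
  rcases ha : PySem.Int.ofChars? a with _ | na <;>
    rcases hb : PySem.Int.ofChars? b with _ | nb <;>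
      rcases hc : PySem.Int.ofChars? c with _ | nc <;>
        rcases hd : PySem.Int.ofChars? d with _ | nd <;>
          simp [pvLoopA, pvHorner, ha, hb, hc, hd]
  obtain ⟨h0a, h0b⟩ := pv_band255_bounds na
  obtain ⟨h1a, h1b⟩ := pv_band255_bounds nb
  obtain ⟨h2a, h2b⟩ := pv_band255_bounds nc
  obtain ⟨h3a, h3b⟩ := pv_band255_bounds nd
  set m0 := PySem.Int.band na 255
  set m1 := PySem.Int.band nb 255
  set m2 := PySem.Int.band nc 255
  set m3 := PySem.Int.band nd 255
  rw [show PySem.Int.bor 0 m0 = m0 from by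
        rw [PySem.Int.bor_comm]; exact PySem.Int.bor_zero m0,
      pv_bor_shift m0 m1 8 h0a (by norm_num; omega) h1a,
      pv_bor_shift (m0 + m1 * 2 ^ 8) m2 16 (by norm_num; omega) (by norm_num; omega) h2a,
      pv_bor_shift (m0 + m1 * 2 ^ 8 + m2 * 2 ^ 16) m3 24 (by norm_num; omega) (by norm_num; omega) h3a]
  norm_num
  ring

-- ===== VERDICT (by name: the statement is the Claim_ definition above) =====
theorem parse_ipv4_to_le_int_spec : Claim_equal_parse_ipv4_to_le_int := by
  intro ip _
  unfold Spec_parse_ipv4_to_le_int parse_ipv4_to_le_int parse_ipv4_to_le_int_alt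
  set parts := PySem.Chars.splitOn ip.toList ['.'] with hp
  by_cases h : parts.length = 4
  · match parts, h with
    | [a, b, c, d], _ => simpa using pv_core a b c d
  · simp [h]
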